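-- pv_equiv track=rewrite | github.com/vinicius-bocchi/custom-tools | cltools.py | combine_ranks
-- ===== SOURCE A (Python) =====
-- def combine_ranks(rk1, rk2, values=False):
--     final_rk=[]
--     if values:
--         col = 2
--     else:
--         col = 1
--     for item1 in rk1:
--         for item2 in rk2:
--             if item1[0] == item2[0]:
--                 final_rk.append([item1[0],item1[col]+item2[col]])
--     return sorted(final_rk, key=lambda x : (x[1],x[0]), reverse=True)
-- ===== SOURCE B (Python) =====
-- def combine_ranks(rk1, rk2, values=False):
--     # Group rk2's rows by key once, then one pass over rk1 with a lookup
--     # (no nested rescans of rk2); same emitted order and final sort as A.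
--     if not rk1 or not rk2:
--         return []
--     col = 2 if values else 1
--     groups = {}
--     for row in rk2:
--         groups[row[0]] = groups.get(row[0], []) + [row]
--     out = []
--     for row in rk1:
--         k = row[0]
--         if k in groups:
--             out += [[k, row[col] + other[col]] for other in groups[k]]
--     return sorted(out, key=lambda x: (x[1], x[0]), reverse=True)
-- ===== Notes on version B (the rewrite author's own statement) =====
-- stated objective: alternative
-- what changed: B replaces A's nested cross-scan of rk1 x rk2 by a grouping pass that indexes rk2's rows by key in a dict, then a single pass over rk1 that looks each key up and emits the whole matching group at once; emitted order and the final sort are unchanged.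
import Mathlib
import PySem

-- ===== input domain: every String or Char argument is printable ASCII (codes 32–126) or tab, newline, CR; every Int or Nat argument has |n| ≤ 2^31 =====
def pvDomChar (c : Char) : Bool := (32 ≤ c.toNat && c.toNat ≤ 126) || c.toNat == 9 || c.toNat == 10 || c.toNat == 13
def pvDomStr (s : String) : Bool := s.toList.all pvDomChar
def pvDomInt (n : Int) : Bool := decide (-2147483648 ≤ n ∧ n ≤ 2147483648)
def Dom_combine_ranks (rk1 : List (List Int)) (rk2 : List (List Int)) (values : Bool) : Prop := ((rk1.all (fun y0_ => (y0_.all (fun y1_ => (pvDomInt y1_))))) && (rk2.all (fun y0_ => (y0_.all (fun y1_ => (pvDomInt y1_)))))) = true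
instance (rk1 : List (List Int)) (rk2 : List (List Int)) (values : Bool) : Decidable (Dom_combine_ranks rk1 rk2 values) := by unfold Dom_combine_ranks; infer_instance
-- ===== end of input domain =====

-- B replaces A's nested cross-scan by one grouping pass over rk2 (a dict of rows per key) and one lookup pass over rk1 emitting each whole group at once (same emitted order, same final sort); objective: alternative.


-- r[i] for a nonnegative index; Pre_ keeps every evaluated index in range, so the .getD 0 default is never the value used
def pvIdx (r : List Int) (i : Int) : Int := (PySem.List.pyGet? r i).getD 0

-- ===== PORT A =====
def combine_ranks (rk1 : List (List Int)) (rk2 : List (List Int)) (values : Bool) : List (List Int) :=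
  let col : Int := if values then 2 else 1
  let final_rk : List (List Int) :=
    rk1.foldl (fun acc item1 =>
      rk2.foldl (fun acc2 item2 =>
        if pvIdx item1 0 = pvIdx item2 0 then
          acc2 ++ [[pvIdx item1 0, pvIdx item1 col + pvIdx item2 col]]
        else acc2) acc) []
  PySem.List.sorted2 final_rk (fun x => pvIdx x 1) (fun x => pvIdx x 0) true

-- ===== PORT B =====
def combine_ranks_alt (rk1 : List (List Int)) (rk2 : List (List Int)) (values : Bool) : List (List Int) :=
  if rk1 = [] ∨ rk2 = [] then []                      -- if not rk1 or not rk2: return []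
  else
    let col : Int := if values then 2 else 1
    -- groups[row[0]] = groups.get(row[0], []) + [row]
    let groups : PySem.Dict Int (List (List Int)) :=
      rk2.foldl (fun d row => d.modify (pvIdx row 0) [] (· ++ [row])) PySem.Dict.empty
    -- for row in rk1: if row[0] in groups: out += [[k, row[col]+other[col]] for other in groups[k]]
    let out : List (List Int) :=
      rk1.foldl (fun acc row =>
        if groups.contains (pvIdx row 0) then
          acc ++ (groups.getD (pvIdx row 0) []).map
            (fun other => [pvIdx row 0, pvIdx row col + pvIdx other col])
        else acc) []
    PySem.List.sorted2 out (fun x => pvIdx x 1) (fun x => pvIdx x 0) true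

-- ===== PRECONDITION & SPEC =====
-- Pre_ excludes exactly the inputs where Python A raises IndexError: when both lists are
-- nonempty, every row's [0] is read, and rows of a matched key must reach index col.
def Pre_combine_ranks (rk1 : List (List Int)) (rk2 : List (List Int)) (values : Bool) : Prop :=
  rk1 = [] ∨ rk2 = [] ∨
    ((∀ r ∈ rk1, r ≠ []) ∧ (∀ r ∈ rk2, r ≠ []) ∧
     ∀ r1 ∈ rk1, ∀ r2 ∈ rk2, r1.headI = r2.headI →
       (if values then 2 else 1) < r1.length ∧ (if values then 2 else 1) < r2.length)
instance (rk1 : List (List Int)) (rk2 : List (List Int)) (values : Bool) : Decidable (Pre_combine_ranks rk1 rk2 values) := by unfold Pre_combine_ranks; infer_instance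
def pvWitness_combine_ranks : List (List Int) × List (List Int) × Bool := ([[1, 10], [2, 20]], [[2, 5], [1, 7]], false)

def Spec_combine_ranks (rk1 : List (List Int)) (rk2 : List (List Int)) (values : Bool) (out : List (List Int)) : Prop := out = combine_ranks_alt rk1 rk2 values
instance (rk1 : List (List Int)) (rk2 : List (List Int)) (values : Bool) (out : List (List Int)) : Decidable (Spec_combine_ranks rk1 rk2 values out) := by unfold Spec_combine_ranks; infer_instance

-- ===== CLAIM (what is proved, stated in full; the proofs are below) =====
def Claim_equal_combine_ranks : Prop := ∀ (rk1 : List (List Int)) (rk2 : List (List Int)) (values : Bool), Dom_combine_ranks rk1 rk2 values → Pre_combine_ranks rk1 rk2 values → Spec_combine_ranks rk1 rk2 values (combine_ranks rk1 rk2 values)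

-- ===== LEMMAS AND PROOFS =====

-- the dict built by B's grouping pass, looked up at k, is exactly the rk2-rows whose key is k
lemma pv_getD_groups (rk2 : List (List Int)) (k : Int) :
    (rk2.foldl (fun d row => d.modify (pvIdx row 0) [] (· ++ [row]))
        (PySem.Dict.empty : PySem.Dict Int (List (List Int)))).getD k []
      = rk2.filter (fun r => pvIdx r 0 == k) := by
  have h : rk2.foldl (fun d row => d.modify (pvIdx row 0) [] (· ++ [row]))
      (PySem.Dict.empty : PySem.Dict Int (List (List Int)))
      = (rk2.map (fun r => (pvIdx r 0, r))).foldl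
          (fun d p => d.modify p.1 [] (· ++ [p.2])) PySem.Dict.empty := by
    rw [List.foldl_map]
  rw [h, PySem.Dict.getD_foldl_modify_append]
  simp [List.filter_map, Function.comp_def]

-- a key the dict does not contain has an empty group of rk2-rows
lemma pv_not_contains (rk2 : List (List Int)) (k : Int)
    (h : (rk2.foldl (fun d row => d.modify (pvIdx row 0) [] (· ++ [row]))
        (PySem.Dict.empty : PySem.Dict Int (List (List Int)))).contains k = false) :
    rk2.filter (fun r => pvIdx r 0 == k) = [] := by
  rw [← pv_getD_groups rk2 k]
  unfold PySem.Dict.getD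
  rw [(PySem.Dict.get?_eq_none_iff_contains _ _).mpr h]
  rfl

-- the pre-sort lists of A and B coincide (when the empty guard does not fire)
lemma pv_out_eq (rk1 rk2 : List (List Int)) (col : Int) :
    rk1.foldl (fun acc item1 =>
        rk2.foldl (fun acc2 item2 =>
          if pvIdx item1 0 = pvIdx item2 0 then
            acc2 ++ [[pvIdx item1 0, pvIdx item1 col + pvIdx item2 col]]
          else acc2) acc) []
      = rk1.foldl (fun acc row =>
          if (rk2.foldl (fun d r => d.modify (pvIdx r 0) [] (· ++ [r]))
              (PySem.Dict.empty : PySem.Dict Int (List (List Int)))).contains (pvIdx row 0) then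
            acc ++ ((rk2.foldl (fun d r => d.modify (pvIdx r 0) [] (· ++ [r]))
                (PySem.Dict.empty : PySem.Dict Int (List (List Int)))).getD (pvIdx row 0) []).map
              (fun other => [pvIdx row 0, pvIdx row col + pvIdx other col])
          else acc) [] := by
  apply PySem.List.foldl_congr_mem
  intro acc row _
  rw [PySem.List.foldl_append_ite (p := fun item2 => pvIdx row 0 = pvIdx item2 0)
    (f := fun item2 => [pvIdx row 0, pvIdx row col + pvIdx item2 col])]
  rw [pv_getD_groups]
  have hf : rk2.filter (fun x => decide (pvIdx row 0 = pvIdx x 0))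
      = rk2.filter (fun r => pvIdx r 0 == pvIdx row 0) := by
    apply List.filter_congr
    intro x _
    by_cases h : pvIdx x 0 = pvIdx row 0
    · simp [h]
    · have h2 : ¬ pvIdx row 0 = pvIdx x 0 := fun hh => h hh.symm
      simp [h, h2]
  by_cases hc : (rk2.foldl (fun d r => d.modify (pvIdx r 0) [] (· ++ [r]))
      (PySem.Dict.empty : PySem.Dict Int (List (List Int)))).contains (pvIdx row 0) = true
  · rw [if_pos hc, hf]
  · rw [if_neg hc]
    rw [hf, pv_not_contains rk2 _ (Bool.eq_false_iff.mpr hc)]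
    simp

-- if either input list is empty, A's pre-sort list is empty
lemma pv_out_nil (rk1 rk2 : List (List Int)) (col : Int)
    (h : rk1 = [] ∨ rk2 = []) :
    rk1.foldl (fun acc item1 =>
        rk2.foldl (fun acc2 item2 =>
          if pvIdx item1 0 = pvIdx item2 0 then
            acc2 ++ [[pvIdx item1 0, pvIdx item1 col + pvIdx item2 col]]
          else acc2) acc) [] = [] := by
  rcases h with h | h
  · simp [h]
  · subst h
    induction rk1 with
    | nil => rfl
    | cons r t ih => simp only [List.foldl_cons, List.foldl_nil] at ih ⊢; exact ih

-- ===== VERDICT (by name: the statement is the Claim_ definition above) =====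
theorem combine_ranks_spec : Claim_equal_combine_ranks := by
  intro rk1 rk2 values _ _
  unfold Spec_combine_ranks combine_ranks combine_ranks_alt
  by_cases hg : rk1 = [] ∨ rk2 = []
  · simp only [hg, if_true]
    rw [pv_out_nil _ _ _ hg]
    simp [PySem.List.sorted2]
  · simp only [hg, if_false]
    rw [pv_out_eq]
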